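-- pv_equiv track=rewrite | github.com/ShibilAhamed701212/clockwork | v1/clockwork_project/clockwork-src/clockwork/index/incremental_scanner.py | _detect_layer
-- ===== SOURCE A (Python) =====
-- _LAYER_PATTERNS: dict[str, list[str]] = {
--     "frontend":       ["frontend", "ui", "client", "web", "static", "public"],
--     "backend":        ["backend", "server", "api", "app", "core", "services"],
--     "database":       ["database", "db", "models", "migrations", "schema"],
--     "infrastructure": ["infra", "infrastructure", "devops", "docker", "scripts"],
--     "tests":          ["tests", "test", "spec"],
-- }
--
-- def _detect_layer(rel_path: str) -> str:
--     norm = rel_path.lower()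
--     for layer, keywords in _LAYER_PATTERNS.items():
--         for kw in keywords:
--             if f"/{kw}/" in norm or norm.startswith(kw + "/"):
--                 return layer
--     if "test" in norm:
--         return "tests"
--     return "backend"
-- ===== SOURCE B (Python) =====
-- _LAYER_PATTERNS: dict[str, list[str]] = {
--     "frontend":       ["frontend", "ui", "client", "web", "static", "public"],
--     "backend":        ["backend", "server", "api", "app", "core", "services"],
--     "database":       ["database", "db", "models", "migrations", "schema"],
--     "infrastructure": ["infra", "infrastructure", "devops", "docker", "scripts"],
--     "tests":          ["tests", "test", "spec"],
-- }
--
-- # reverse index: keyword -> (priority rank in table order, layer)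
-- _KW_RANK: dict[str, tuple[int, str]] = {}
-- for _layer, _kws in _LAYER_PATTERNS.items():
--     for _kw in _kws:
--         _KW_RANK[_kw] = (len(_KW_RANK), _layer)
--
--
-- def _detect_layer(rel_path: str) -> str:
--     norm = rel_path.lower()
--     best = None
--     for seg in norm.split("/")[:-1]:
--         hit = _KW_RANK.get(seg)
--         if hit is not None and (best is None or hit[0] < best[0]):
--             best = hit
--     if best is not None:
--         return best[1]
--     return "tests" if "test" in norm else "backend"
-- ===== Notes on version B (the rewrite author's own statement) =====
-- stated objective: faster
-- what changed: B inverts the iteration: instead of scanning the whole path once per keyword of the layer table, it precomputes a reverse index keyword -> (table rank, layer) once at module load, then makes a single pass over the path's non-final slash segments keeping the hit of minimal rank, which reproduces A's first-match-in-table-order priority.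
import Mathlib
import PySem

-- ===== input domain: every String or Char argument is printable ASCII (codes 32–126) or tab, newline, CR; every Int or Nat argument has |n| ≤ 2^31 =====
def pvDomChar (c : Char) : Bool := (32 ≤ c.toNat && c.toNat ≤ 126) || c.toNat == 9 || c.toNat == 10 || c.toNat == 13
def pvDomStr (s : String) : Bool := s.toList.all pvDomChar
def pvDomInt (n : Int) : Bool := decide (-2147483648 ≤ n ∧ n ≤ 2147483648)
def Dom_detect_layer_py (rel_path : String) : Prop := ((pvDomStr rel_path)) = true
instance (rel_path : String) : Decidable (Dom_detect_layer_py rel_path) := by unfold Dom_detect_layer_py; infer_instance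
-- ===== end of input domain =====

-- B inverts the iteration: a reverse index keyword -> (table rank, layer) built once, then one pass
-- over the path's non-final segments keeping the hit of minimal rank (objective: faster in a timing run).

-- ===== PORT A =====
def pvLayerPatterns : List (String × List String) :=
  [ ("frontend",       ["frontend", "ui", "client", "web", "static", "public"]),
    ("backend",        ["backend", "server", "api", "app", "core", "services"]),
    ("database",       ["database", "db", "models", "migrations", "schema"]),
    ("infrastructure", ["infra", "infrastructure", "devops", "docker", "scripts"]),
    ("tests",          ["tests", "test", "spec"]) ]

-- the inner-loop condition:  f"/{kw}/" in norm or norm.startswith(kw + "/")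
def pvHitA (norm : List Char) (kw : String) : Bool :=
  PySem.Chars.isIn ('/' :: (kw.toList ++ ['/'])) norm
    || PySem.Chars.startswith norm (kw.toList ++ ['/'])

-- the two nested loops of A, returning the first matching layer
def pvScanA (norm : List Char) : List (String × List String) → Option String
  | [] => none
  | (layer, kws) :: rest =>
      if kws.any (pvHitA norm) then some layer else pvScanA norm rest

def detect_layer_py (rel_path : String) : String :=
  let norm := PySem.Chars.lower rel_path.toList
  match pvScanA norm pvLayerPatterns with
  | some layer => layer
  | none => if PySem.Chars.isIn "test".toList norm then "tests" else "backend"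

-- ===== PORT B =====
-- module-level reverse index: _KW_RANK[kw] = (len(_KW_RANK), layer), built by Source B's two loops
def pvKwRank : PySem.Dict (List Char) (Int × String) :=
  pvLayerPatterns.foldl
    (fun d p => p.2.foldl (fun d kw => d.insert kw.toList ((d.size : Int), p.1)) d)
    PySem.Dict.empty

-- the body of B's single loop over segments: keep the hit of minimal rank
def pvStep (best : Option (Int × String)) (seg : List Char) : Option (Int × String) :=
  match pvKwRank.get? seg with
  | none => best
  | some hit =>
      match best with
      | none => some hit
      | some b => if hit.1 < b.1 then some hit else some b

def detect_layer_py_alt (rel_path : String) : String :=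
  let norm := PySem.Chars.lower rel_path.toList
  let segs := PySem.List.slice (PySem.Chars.splitOn norm ['/']) none (some (-1))   -- norm.split('/')[:-1]
  match segs.foldl pvStep none with
  | some b => b.2
  | none => if PySem.Chars.isIn "test".toList norm then "tests" else "backend"

-- ===== PRECONDITION & SPEC =====
def Spec_detect_layer_py (rel_path : String) (out : String) : Prop := out = detect_layer_py_alt rel_path
instance (rel_path : String) (out : String) : Decidable (Spec_detect_layer_py rel_path out) := by unfold Spec_detect_layer_py; infer_instance

-- ===== CLAIM (what is proved, stated in full; the proofs are below) =====
def Claim_equal_detect_layer_py : Prop := ∀ (rel_path : String), Dom_detect_layer_py rel_path → Spec_detect_layer_py rel_path (detect_layer_py rel_path)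

-- ===== LEMMAS AND PROOFS =====

-- the flattened, ranked keyword table (proof-side view of _KW_RANK's items)
def pvRanked : List (List Char × Int × String) :=
  [ ("frontend".toList, 0, "frontend"), ("ui".toList, 1, "frontend"), ("client".toList, 2, "frontend"),
    ("web".toList, 3, "frontend"), ("static".toList, 4, "frontend"), ("public".toList, 5, "frontend"),
    ("backend".toList, 6, "backend"), ("server".toList, 7, "backend"), ("api".toList, 8, "backend"),
    ("app".toList, 9, "backend"), ("core".toList, 10, "backend"), ("services".toList, 11, "backend"),
    ("database".toList, 12, "database"), ("db".toList, 13, "database"), ("models".toList, 14, "database"),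
    ("migrations".toList, 15, "database"), ("schema".toList, 16, "database"),
    ("infra".toList, 17, "infrastructure"), ("infrastructure".toList, 18, "infrastructure"),
    ("devops".toList, 19, "infrastructure"), ("docker".toList, 20, "infrastructure"),
    ("scripts".toList, 21, "infrastructure"),
    ("tests".toList, 22, "tests"), ("test".toList, 23, "tests"), ("spec".toList, 24, "tests") ]

-- a structural model of norm.split('/'), used only in the proofs
def headMod (pre : List Char) : List (List Char) → List (List Char)
  | [] => []
  | s :: S => (pre ++ s) :: S

def mySplit : List Char → List (List Char)
  | [] => [[]]
  | c :: rest => if c = '/' then [] :: mySplit rest else headMod [c] (mySplit rest)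

lemma mySplit_cons_slash (rest : List Char) : mySplit ('/' :: rest) = [] :: mySplit rest := by
  simp [mySplit]

lemma mySplit_cons_ne {c : Char} (hc : c ≠ '/') (rest : List Char) :
    mySplit (c :: rest) = headMod [c] (mySplit rest) := by
  simp [mySplit, hc]

lemma mySplit_ne_nil (cs : List Char) : mySplit cs ≠ [] := by
  induction cs with
  | nil => simp [mySplit]
  | cons c rest ih =>
      by_cases hc : c = '/'
      · subst hc; rw [mySplit_cons_slash]; simp
      · rw [mySplit_cons_ne hc]
        cases h : mySplit rest with
        | nil => exact absurd h ih
        | cons s S => simp [headMod]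

lemma splitOn_go_spec (l : List Char) : ∀ (fuel : Nat), l.length ≤ fuel →
    ∀ (cur : List Char) (acc : List (List Char)),
    PySem.Chars.splitOn.go ['/'] fuel l cur acc
      = acc.reverse ++ headMod cur.reverse (mySplit l) := by
  induction l with
  | nil =>
      intro fuel _ cur acc
      cases fuel <;> simp [PySem.Chars.splitOn.go, mySplit, headMod]
  | cons c rest ih =>
      intro fuel hf cur acc
      cases fuel with
      | zero => simp at hf
      | succ f =>
          simp only [List.length_cons] at hf
          by_cases hc : c = '/'
          · subst hc
            rw [show PySem.Chars.splitOn.go ['/'] (f+1) ('/'::rest) cur acc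
                  = PySem.Chars.splitOn.go ['/'] f rest [] (cur.reverse :: acc) by
                  simp [PySem.Chars.splitOn.go, List.isPrefixOf]]
            rw [ih f (by omega) [] (cur.reverse :: acc), mySplit_cons_slash]
            have hne := mySplit_ne_nil rest
            cases h : mySplit rest with
            | nil => exact absurd h hne
            | cons s S => simp [headMod]
          · rw [show PySem.Chars.splitOn.go ['/'] (f+1) (c::rest) cur acc
                  = PySem.Chars.splitOn.go ['/'] f rest (c :: cur) acc by
                  simp only [PySem.Chars.splitOn.go, List.isPrefixOf]
                  split
                  next h => exact absurd (by simpa using h : '/' = c).symm hc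
                  next => rfl]
            rw [ih f (by omega) (c :: cur) acc, mySplit_cons_ne hc]
            have hne := mySplit_ne_nil rest
            cases h : mySplit rest with
            | nil => exact absurd h hne
            | cons s S => simp [headMod]

lemma splitOn_eq_mySplit (cs : List Char) :
    PySem.Chars.splitOn cs ['/'] = mySplit cs := by
  show PySem.Chars.splitOn.go ['/'] (cs.length + 1) cs [] [] = mySplit cs
  rw [splitOn_go_spec cs (cs.length + 1) (by omega) [] []]
  cases h : mySplit cs with
  | nil => exact absurd h (mySplit_ne_nil cs)
  | cons s S => simp [headMod]

-- xs[:-1] is dropLast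
lemma slice_neg_one (xs : List (List Char)) :
    PySem.List.slice xs none (some (-1)) = xs.dropLast := by
  simp only [PySem.List.slice, PySem.List.clampIdx]
  cases xs with
  | nil => simp
  | cons x t =>
      have h1 : ¬ ((x :: t).length : Int) + (-1) < 0 := by simp
      simp only [if_pos (by norm_num : (-1 : Int) < 0), if_neg h1]
      have h2 : ((((x :: t).length : Int) + (-1)).toNat) = t.length := by simp
      rw [h2, List.dropLast_eq_take]
      simp

-- a keyword followed by '/' is a prefix of cs iff it is exactly the first segment and not the last
lemma prefix_iff_head_seg (kw : List Char) (hkw : '/' ∉ kw) :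
    ∀ cs : List Char, (kw ++ ['/'] <+: cs ↔ ∃ S, mySplit cs = kw :: S ∧ S ≠ []) := by
  induction kw with
  | nil =>
      intro cs
      cases cs with
      | nil =>
          constructor
          · intro h; exact absurd (List.eq_nil_of_prefix_nil h) (by simp)
          · rintro ⟨S, hS, hSne⟩
            simp only [mySplit] at hS
            injection hS with h1 h2
            exact (hSne h2.symm).elim
      | cons c rest =>
          by_cases hc : c = '/'
          · subst hc
            rw [mySplit_cons_slash]
            simp only [List.nil_append]
            constructor
            · intro _; exact ⟨mySplit rest, rfl, mySplit_ne_nil rest⟩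
            · intro _; exact ⟨rest, by simp⟩
          · rw [mySplit_cons_ne hc]
            simp only [List.nil_append]
            constructor
            · intro h
              rw [List.cons_prefix_cons] at h
              exact absurd h.1.symm hc
            · cases h : mySplit rest with
              | nil => exact absurd h (mySplit_ne_nil rest)
              | cons s S =>
                  rintro ⟨S', hS', _⟩
                  simp [headMod] at hS'
  | cons k kw' ih =>
      have hk : k ≠ '/' := by intro h; exact hkw (h ▸ List.mem_cons_self ..)
      have hkw' : '/' ∉ kw' := fun h => hkw (List.mem_cons_of_mem _ h)
      intro cs
      cases cs with
      | nil =>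
          constructor
          · intro h; exact absurd (List.eq_nil_of_prefix_nil h) (by simp)
          · rintro ⟨S, hS, hSne⟩; simp [mySplit] at hS
      | cons c rest =>
          by_cases hc : c = '/'
          · subst hc
            rw [mySplit_cons_slash]
            simp only [List.cons_append, List.cons_prefix_cons]
            constructor
            · rintro ⟨h1, _⟩; exact absurd h1 hk
            · rintro ⟨S, hS, _⟩
              injection hS with h1 _
              exact absurd h1 (by simp)
          · rw [mySplit_cons_ne hc]
            simp only [List.cons_append, List.cons_prefix_cons]
            cases h : mySplit rest with
            | nil => exact absurd h (mySplit_ne_nil rest)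
            | cons s S =>
                have hrest := ih hkw' rest
                rw [h] at hrest
                simp only [headMod]
                constructor
                · rintro ⟨rfl, h2⟩
                  obtain ⟨S', hS', hS'ne⟩ := hrest.mp h2
                  obtain ⟨h1, h2'⟩ := List.cons_eq_cons.mp hS'
                  exact ⟨S, by rw [h1]; simp, by rw [h2']; exact hS'ne⟩
                · rintro ⟨S', hS', hS'ne⟩
                  obtain ⟨h1, h2'⟩ := List.cons_eq_cons.mp hS'
                  obtain ⟨hck, hsw⟩ : c = k ∧ s = kw' := by simpa using h1
                  exact ⟨hck.symm, hrest.mpr ⟨S', by rw [hsw, h2'], hS'ne⟩⟩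

lemma pv_exists_cons_iff (kw s y : List Char) (S : List (List Char)) :
    (∃ S0, s :: y :: S = kw :: S0 ∧ S0 ≠ []) ↔ kw = s := by
  constructor
  · rintro ⟨S0, hS0, _⟩; exact ((List.cons_eq_cons.mp hS0).1).symm
  · rintro rfl; exact ⟨y :: S, rfl, by simp⟩

lemma pv_mem_dropLast_cons (kw s y : List Char) (S : List (List Char)) :
    kw ∈ (s :: y :: S).dropLast ↔ kw = s ∨ kw ∈ (y :: S).dropLast := by
  rw [List.dropLast_cons_of_ne_nil (by simp), List.mem_cons]

-- "/kw/" occurs in cs iff kw is a non-final segment other than the first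
lemma infix_iff_tail_seg (kw : List Char) (hkw : '/' ∉ kw) :
    ∀ cs : List Char, ('/' :: kw ++ ['/'] <:+: cs ↔ kw ∈ ((mySplit cs).tail).dropLast) := by
  intro cs
  induction cs with
  | nil =>
      simp only [mySplit, List.tail_cons, List.dropLast_nil, List.not_mem_nil, iff_false]
      intro h
      have := List.eq_nil_of_infix_nil h
      simp at this
  | cons c rest ih =>
      by_cases hc : c = '/'
      · subst hc
        rw [List.infix_cons_iff, mySplit_cons_slash]
        simp only [List.tail_cons]
        have hpfx : ('/' :: kw ++ ['/'] <+: '/' :: rest) ↔ (kw ++ ['/'] <+: rest) := by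
          simp [List.cons_prefix_cons]
        rw [hpfx, prefix_iff_head_seg kw hkw rest, ih]
        cases h : mySplit rest with
        | nil => exact absurd h (mySplit_ne_nil rest)
        | cons s S =>
            simp only [List.tail_cons]
            cases S with
            | nil => simp
            | cons s' S' =>
                rw [pv_mem_dropLast_cons, pv_exists_cons_iff]
      · rw [List.infix_cons_iff, mySplit_cons_ne hc]
        have hpfx : ¬ ('/' :: kw ++ ['/'] <+: c :: rest) := by
          rw [List.cons_append, List.cons_prefix_cons]
          rintro ⟨h1, _⟩; exact hc h1.symm
        cases h : mySplit rest with
        | nil => exact absurd h (mySplit_ne_nil rest)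
        | cons s S =>
            rw [h] at ih
            simp only [List.tail_cons] at ih
            simp only [headMod, List.tail_cons]
            rw [ih]
            simp only [hpfx, false_or]

-- A's whole condition for one keyword is membership among the non-final segments
lemma cond_iff_seg (kw : List Char) (hkw : '/' ∉ kw) (cs : List Char) :
    (('/' :: (kw ++ ['/']) <:+: cs) ∨ (kw ++ ['/'] <+: cs)) ↔ kw ∈ (mySplit cs).dropLast := by
  rw [show ('/' :: (kw ++ ['/'])) = ('/' :: kw ++ ['/']) by simp]
  rw [infix_iff_tail_seg kw hkw cs, prefix_iff_head_seg kw hkw cs]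
  cases h : mySplit cs with
  | nil => exact absurd h (mySplit_ne_nil cs)
  | cons s S =>
      simp only [List.tail_cons]
      cases S with
      | nil => simp
      | cons s' S' =>
          rw [pv_mem_dropLast_cons, pv_exists_cons_iff]
          tauto

-- per-keyword: A's boolean test = list membership among the non-final segments
lemma hit_eq (norm : List Char) (kw : String) (hkw : '/' ∉ kw.toList) :
    pvHitA norm kw = ((mySplit norm).dropLast).contains kw.toList := by
  have h1 : (((mySplit norm).dropLast).contains kw.toList = true)
      ↔ kw.toList ∈ (mySplit norm).dropLast := List.contains_iff_mem
  rcases Bool.eq_false_or_eq_true (pvHitA norm kw) with hb | hb <;> rw [hb] <;> symm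
  · rw [h1, ← cond_iff_seg kw.toList hkw norm]
    unfold pvHitA at hb
    rcases Bool.or_eq_true_iff.mp hb with h | h
    · exact Or.inl ((PySem.Chars.isIn_iff_infix _ _).mp h)
    · exact Or.inr ((PySem.Chars.startswith_iff _ _).mp h)
  · rw [Bool.eq_false_iff, Ne, h1]
    intro hmem
    rw [← cond_iff_seg kw.toList hkw norm] at hmem
    unfold pvHitA at hb
    rw [Bool.or_eq_false_iff] at hb
    rcases hmem with hinf | hpfx
    · exact (PySem.Chars.isIn_eq_false_iff _ _).mp hb.1 hinf
    · have h2 := hb.2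
      rw [← Bool.not_eq_true, PySem.Chars.startswith_iff] at h2
      exact h2 hpfx

-- proof-side view of A's scan: same recursion, membership test
def scanC (segs : List (List Char)) : List (String × List String) → Option String
  | [] => none
  | (layer, kws) :: rest =>
      if kws.any (fun kw => segs.contains kw.toList) then some layer else scanC segs rest

def pvGood (p : String × List String) : Prop := ∀ kw ∈ p.2, '/' ∉ kw.toList

lemma scan_eq (norm : List Char) (pats : List (String × List String))
    (hgood : ∀ p ∈ pats, pvGood p) :
    pvScanA norm pats = scanC ((mySplit norm).dropLast) pats := by
  induction pats with
  | nil => rfl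
  | cons p rest ih =>
      obtain ⟨layer, kws⟩ := p
      simp only [pvScanA, scanC]
      have hany : kws.any (pvHitA norm)
          = kws.any (fun kw => ((mySplit norm).dropLast).contains kw.toList) := by
        clear ih
        induction kws with
        | nil => rfl
        | cons kw t iht =>
            simp only [List.any_cons]
            have hg := hgood (layer, kw :: t) (List.mem_cons_self ..) kw (List.mem_cons_self ..)
            rw [hit_eq norm kw hg, iht (by
              intro p hp
              rcases List.mem_cons.mp hp with rfl | hp
              · intro k hk; exact hgood (layer, kw :: t) (List.mem_cons_self ..) k (List.mem_cons_of_mem _ hk)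
              · exact hgood p (List.mem_cons_of_mem _ hp))]
      rw [hany]
      split
      · rfl
      · exact ih (fun p hp => hgood p (List.mem_cons_of_mem _ hp))

lemma pats_good : ∀ p ∈ pvLayerPatterns, pvGood p := by
  intro p hp
  unfold pvGood
  fin_cases hp <;> decide

-- the flattening of the layer table
def pvFlat1 (p : String × List String) : List (List Char × String) :=
  p.2.map (fun kw => (kw.toList, p.1))

lemma find_map_layer (segs : List (List Char)) (layer : String) (kws : List String) :
    ((kws.map (fun kw => (kw.toList, layer))).find? (fun e => segs.contains e.1)).map (·.2)
      = if kws.any (fun kw => segs.contains kw.toList) then some layer else none := by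
  induction kws with
  | nil => rfl
  | cons kw t ih =>
      simp only [List.map_cons, List.any_cons]
      by_cases h : segs.contains kw.toList
      · rw [List.find?_cons_of_pos (p := fun e : List Char × String => segs.contains e.1) (by exact h)]
        have hm : kw.toList ∈ segs := List.contains_iff_mem.mp h
        simp [hm]
      · rw [List.find?_cons_of_neg (p := fun e : List Char × String => segs.contains e.1) (by exact h)]
        simp only [h, Bool.false_or]
        exact ih

lemma scanC_eq_find (segs : List (List Char)) (pats : List (String × List String)) :
    scanC segs pats
      = ((pats.flatMap pvFlat1).find? (fun e => segs.contains e.1)).map (·.2) := by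
  induction pats with
  | nil => rfl
  | cons p rest ih =>
      obtain ⟨layer, kws⟩ := p
      simp only [scanC, List.flatMap_cons, List.find?_append]
      have hfm := find_map_layer segs layer kws
      rw [show pvFlat1 (layer, kws) = kws.map (fun kw => (kw.toList, layer)) from rfl]
      cases hf : (kws.map (fun kw => (kw.toList, layer))).find? (fun e => segs.contains e.1) with
      | none =>
          rw [hf] at hfm
          have hany : kws.any (fun kw => segs.contains kw.toList) = false := by
            by_contra hh
            rw [Bool.not_eq_false] at hh
            rw [hh] at hfm; simp at hfm
          rw [if_neg (by rw [hany]; simp), Option.none_or]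
          exact ih
      | some e =>
          rw [hf] at hfm
          have hany : kws.any (fun kw => segs.contains kw.toList) = true := by
            by_contra hh
            rw [Bool.not_eq_true] at hh
            rw [hh] at hfm; simp at hfm
          rw [hany] at hfm
          simp only [Option.map_some] at hfm
          rw [if_pos hany, Option.some_or, Option.map_some]
          exact hfm.symm

-- attach the ranks: the flattened table is pvRanked with the middle component dropped
lemma flat_eq_ranked_map :
    pvLayerPatterns.flatMap pvFlat1 = pvRanked.map (fun e => (e.1, e.2.2)) := by decide

lemma findA_eq_ranked (segs : List (List Char)) :
    ((pvLayerPatterns.flatMap pvFlat1).find? (fun e => segs.contains e.1)).map (·.2)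
      = (pvRanked.find? (fun e => segs.contains e.1)).map (fun e => e.2.2) := by
  rw [flat_eq_ranked_map, List.find?_map, Option.map_map]
  rfl

-- ===== B-side =====

-- _KW_RANK evaluates to the literal dict with pvRanked as its items
lemma kwRank_eq : pvKwRank = PySem.Dict.mk (pvRanked.map (fun e => (e.1, e.2))) := by decide

lemma get?_mk_eq_find (l : List (List Char × (Int × String))) (x : List Char) :
    (PySem.Dict.mk l).get? x = (l.find? (fun e => e.1 == x)).map (·.2) := by
  induction l with
  | nil => rfl
  | cons e t ih =>
      obtain ⟨k, v⟩ := e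
      rw [PySem.Dict.get?_mk_cons, List.find?_cons]
      by_cases h : (k == x) <;> simp [h, ih]

lemma lookup_eq (seg : List Char) :
    pvKwRank.get? seg = (pvRanked.find? (fun e => e.1 == seg)).map (·.2) := by
  rw [kwRank_eq, get?_mk_eq_find, List.find?_map, Option.map_map]
  rfl

-- the left-biased minimum-by-rank combiner B's loop body implements
def mcomb (a b : Option (Int × String)) : Option (Int × String) :=
  match a, b with
  | a, none => a
  | none, some y => some y
  | some x, some y => if y.1 < x.1 then some y else some x

lemma step_eq_mcomb (best : Option (Int × String)) (seg : List Char) :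
    pvStep best seg = mcomb best (pvKwRank.get? seg) := by
  unfold pvStep mcomb
  cases pvKwRank.get? seg <;> cases best <;> rfl

lemma mcomb_none_left (b : Option (Int × String)) : mcomb none b = b := by
  unfold mcomb; cases b <;> rfl

lemma mcomb_none_right (a : Option (Int × String)) : mcomb a none = a := by
  unfold mcomb; cases a <;> rfl

lemma mcomb_assoc (a b c : Option (Int × String)) :
    mcomb (mcomb a b) c = mcomb a (mcomb b c) := by
  cases a with
  | none => rw [mcomb_none_left, mcomb_none_left]
  | some x =>
    cases b with
    | none => rw [mcomb_none_right, mcomb_none_left]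
    | some y =>
      cases c with
      | none => rw [mcomb_none_right, mcomb_none_right]
      | some z =>
        show mcomb (if y.1 < x.1 then some y else some x) (some z)
            = mcomb (some x) (if z.1 < y.1 then some z else some y)
        by_cases hxy : y.1 < x.1
        · rw [if_pos hxy]
          by_cases hzy : z.1 < y.1
          · rw [if_pos hzy]
            show (if z.1 < y.1 then some z else some y) = if z.1 < x.1 then some z else some x
            rw [if_pos hzy, if_pos (by omega)]
          · rw [if_neg hzy]
            show (if z.1 < y.1 then some z else some y) = if y.1 < x.1 then some y else some x
            rw [if_neg hzy, if_pos hxy]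
        · rw [if_neg hxy]
          by_cases hzy : z.1 < y.1
          · rw [if_pos hzy]
          · rw [if_neg hzy]
            show (if z.1 < x.1 then some z else some x) = if y.1 < x.1 then some y else some x
            rw [if_neg hxy, if_neg (by omega)]

-- B's result for the segments seen so far, expressed through find? on the ranked table
def pvF (pred : List Char → Bool) : Option (Int × String) :=
  (pvRanked.find? (fun e => pred e.1)).map (·.2)

lemma ranked_mono : pvRanked.Pairwise (fun a b => a.2.1 < b.2.1) := by decide

-- merging a single key lookup into an already-found minimum: first match in rank order wins
lemma min_find (seg : List Char) (c : List Char → Bool) :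
    ∀ R : List (List Char × Int × String), R.Pairwise (fun a b => a.2.1 < b.2.1) →
      mcomb ((R.find? (fun e => e.1 == seg)).map (·.2)) ((R.find? (fun e => c e.1)).map (·.2))
        = (R.find? (fun e => (e.1 == seg) || c e.1)).map (·.2) := by
  intro R
  induction R with
  | nil => intro _; rfl
  | cons e t ih =>
      intro hpw
      have hpw' := (List.pairwise_cons.mp hpw).2
      have hlt := (List.pairwise_cons.mp hpw).1
      by_cases h1 : (e.1 == seg) = true
      · by_cases h2 : c e.1 = true
        · rw [List.find?_cons_of_pos (p := fun x : List Char × Int × String => x.1 == seg) h1, List.find?_cons_of_pos (p := fun x : List Char × Int × String => c x.1) h2,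
              List.find?_cons_of_pos (by simp [h1])]
          simp only [Option.map_some]
          show (if e.2.1 < e.2.1 then some e.2 else some e.2) = some e.2
          rw [if_neg (by omega)]
        · rw [List.find?_cons_of_pos (p := fun x : List Char × Int × String => x.1 == seg) h1, List.find?_cons_of_neg (p := fun x : List Char × Int × String => c x.1) (by simp [h2]),
              List.find?_cons_of_pos (by simp [h1])]
          cases hf : t.find? (fun e => c e.1) with
          | none =>
              exact mcomb_none_right _
          | some y =>
              have hy : e.2.1 < y.2.1 := hlt y (List.mem_of_find?_eq_some hf)
              simp only [Option.map_some]
              show (if y.2.1 < e.2.1 then some y.2 else some e.2) = some e.2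
              rw [if_neg (by omega)]
      · by_cases h2 : c e.1 = true
        · rw [List.find?_cons_of_neg (p := fun x : List Char × Int × String => x.1 == seg) (by simp [h1]), List.find?_cons_of_pos (p := fun x : List Char × Int × String => c x.1) h2,
              List.find?_cons_of_pos (p := fun x : List Char × Int × String => x.1 == seg || c x.1) (by simp [h1, h2])]
          cases hf : t.find? (fun e => e.1 == seg) with
          | none =>
              exact mcomb_none_left _
          | some x =>
              have hx : e.2.1 < x.2.1 := hlt x (List.mem_of_find?_eq_some hf)
              simp only [Option.map_some]
              show (if e.2.1 < x.2.1 then some e.2 else some x.2) = some e.2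
              rw [if_pos (by omega)]
        · rw [List.find?_cons_of_neg (p := fun x : List Char × Int × String => x.1 == seg) (by simp [h1]), List.find?_cons_of_neg (p := fun x : List Char × Int × String => c x.1) (by simp [h2]),
              List.find?_cons_of_neg (p := fun x : List Char × Int × String => x.1 == seg || c x.1) (by simp [h1, h2])]
          exact ih hpw'

lemma pvF_nil : pvF (fun x => ([] : List (List Char)).contains x) = none := by
  unfold pvF
  rw [show (fun e : List Char × Int × String => ([] : List (List Char)).contains e.1)
        = (fun _ => false) by funext e; rfl]
  simp

lemma fold_spec (segs : List (List Char)) :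
    ∀ best, segs.foldl pvStep best = mcomb best (pvF (fun x => segs.contains x)) := by
  induction segs with
  | nil =>
      intro best
      simp only [List.foldl_nil, pvF_nil]
      unfold mcomb; cases best <;> rfl
  | cons seg rest ih =>
      intro best
      simp only [List.foldl_cons]
      rw [step_eq_mcomb, ih, lookup_eq, mcomb_assoc]
      congr 1
      have := min_find seg (fun x => rest.contains x) pvRanked ranked_mono
      unfold pvF
      rw [show (fun e : List Char × Int × String => (seg :: rest).contains e.1)
            = (fun e : List Char × Int × String => (e.1 == seg) || rest.contains e.1) by
            funext e; rw [List.contains_cons]]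
      exact this

-- ===== VERDICT (by name: the statement is the Claim_ definition above) =====
theorem detect_layer_py_spec : Claim_equal_detect_layer_py := by
  intro rel_path _
  unfold Spec_detect_layer_py detect_layer_py detect_layer_py_alt
  simp only []
  rw [scan_eq (PySem.Chars.lower rel_path.toList) pvLayerPatterns pats_good,
      scanC_eq_find, findA_eq_ranked,
      splitOn_eq_mySplit, slice_neg_one, fold_spec, mcomb_none_left]
  unfold pvF
  cases (pvRanked.find? (fun e => ((mySplit (PySem.Chars.lower rel_path.toList)).dropLast).contains e.1)) <;> rfl
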